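-- pv_equiv track=rewrite | github.com/Johnny-liqiang/Technical-Coding-Questions | src/ama-oa2-ng/CountTeam.py | countTeams
-- ===== SOURCE A (Python) =====
-- from typing import List
--
-- def countTeams(num: int, skills: List[int], minAssociates: int, minLevel: int, maxLevel: int) -> int:
--     # WRITE YOUR BRILLIANT CODE HERE
--     qualified = []
--     possible_teams = [[]]
--
--     for a in skills:
--         if minLevel <= a <= maxLevel:
--             qualified.append(a)
--
--     num_teams = 0
--     while qualified:
--         person = qualified.pop()
--         new_teams = []
--         for team in possible_teams:
--             new_team = [person] + team
--             if len(new_team) >= minAssociates: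
--                 num_teams += 1
--             new_teams.append(new_team)
--         possible_teams += new_teams
--
--     return num_teams
-- ===== SOURCE B (Python) =====
-- def countTeams(num, skills, minAssociates, minLevel, maxLevel):
--     # count qualified people, then sum binomial coefficients C(q, k) for k >= minAssociates (k >= 1)
--     q = 0
--     for a in skills:
--         if minLevel <= a <= maxLevel:
--             q += 1
--     total = 0
--     c = 1  # c = C(q, k) maintained multiplicatively
--     for k in range(1, q + 1):
--         c = c * (q - k + 1) // k
--         if k >= minAssociates:
--             total += c
--     return total
-- ===== Notes on version B (the rewrite author's own statement) =====
-- stated objective: alternative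
-- what changed: B replaces A's explicit enumeration of all subsets of qualified people with counting the qualified people and summing binomial coefficients C(q,k) for k from max(minAssociates,1) to q, computed by the multiplicative recurrence.
import Mathlib
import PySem

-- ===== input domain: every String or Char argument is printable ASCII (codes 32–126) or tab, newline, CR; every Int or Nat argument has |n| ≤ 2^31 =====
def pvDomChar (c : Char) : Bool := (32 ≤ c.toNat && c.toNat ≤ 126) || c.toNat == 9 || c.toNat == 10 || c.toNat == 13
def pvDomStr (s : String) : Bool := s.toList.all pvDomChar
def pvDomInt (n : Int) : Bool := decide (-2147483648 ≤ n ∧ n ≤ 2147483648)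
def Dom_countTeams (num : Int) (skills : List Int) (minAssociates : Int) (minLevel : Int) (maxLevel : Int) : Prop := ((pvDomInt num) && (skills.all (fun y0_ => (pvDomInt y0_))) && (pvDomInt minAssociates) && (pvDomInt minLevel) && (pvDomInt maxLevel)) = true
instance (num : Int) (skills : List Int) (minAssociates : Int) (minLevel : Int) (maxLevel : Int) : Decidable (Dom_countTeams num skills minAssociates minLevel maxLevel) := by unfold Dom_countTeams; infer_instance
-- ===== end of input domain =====

-- B counts the qualified people and sums binomial coefficients instead of enumerating subsets explicitly (objective: alternative).

-- ===== PORT A =====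
-- the while loop: each iteration pops the LAST element of qualified, so the loop consumes
-- qualified in reverse order; we recurse over qualified.reverse.
def countTeamsLoop (minAssociates : Int) : List Int → List (List Int) → Int → Int
  | [], _, numTeams => numTeams
  | person :: rest, possibleTeams, numTeams =>
      -- the for loop over possible_teams: counts and builds new_teams in one pass
      let st := possibleTeams.foldl
        (fun (st : Int × List (List Int)) team =>
          let newTeam := [person] ++ team
          ((if minAssociates ≤ (newTeam.length : Int) then st.1 + 1 else st.1), st.2 ++ [newTeam]))
        (numTeams, [])
      countTeamsLoop minAssociates rest (possibleTeams ++ st.2) st.1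

def countTeams (num : Int) (skills : List Int) (minAssociates : Int) (minLevel : Int) (maxLevel : Int) : Int :=
  let qualified := skills.foldl (fun q a => if minLevel ≤ a ∧ a ≤ maxLevel then q ++ [a] else q) ([] : List Int)
  countTeamsLoop minAssociates qualified.reverse [[]] 0

-- ===== PORT B =====
def countTeams_alt (num : Int) (skills : List Int) (minAssociates : Int) (minLevel : Int) (maxLevel : Int) : Int :=
  let q := skills.foldl (fun q a => if minLevel ≤ a ∧ a ≤ maxLevel then q + 1 else q) (0 : Int)
  ((PySem.List.pyRange 1 (q + 1) 1).foldl
    (fun (st : Int × Int) k =>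
      let c := PySem.Int.floordiv (st.2 * (q - k + 1)) k
      ((if minAssociates ≤ k then st.1 + c else st.1), c))
    (0, 1)).1

-- ===== PRECONDITION & SPEC =====
def Spec_countTeams (num : Int) (skills : List Int) (minAssociates : Int) (minLevel : Int) (maxLevel : Int) (out : Int) : Prop := out = countTeams_alt num skills minAssociates minLevel maxLevel
instance (num : Int) (skills : List Int) (minAssociates : Int) (minLevel : Int) (maxLevel : Int) (out : Int) : Decidable (Spec_countTeams num skills minAssociates minLevel maxLevel out) := by unfold Spec_countTeams; infer_instance

-- ===== CLAIM (what is proved, stated in full; the proofs are below) =====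
def Claim_equal_countTeams : Prop := ∀ (num : Int) (skills : List Int) (minAssociates : Int) (minLevel : Int) (maxLevel : Int), Dom_countTeams num skills minAssociates minLevel maxLevel → Spec_countTeams num skills minAssociates minLevel maxLevel (countTeams num skills minAssociates minLevel maxLevel)

-- ===== LEMMAS AND PROOFS =====

-- weight of one team of length l with j persons still to process, in A's loop
def Wf (m : Int) : Nat → Nat → Int
  | 0, _ => 0
  | j + 1, l => Wf m j l + Wf m j (l + 1) + (if m ≤ (l : Int) + 1 then 1 else 0)

-- closed form: sum over subset sizes s+1 of the binomial coefficients
def Sf (m : Int) (j l : Nat) : Int :=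
  ∑ s ∈ Finset.range j, (if m ≤ (l : Int) + ((s : Int) + 1) then ((j.choose (s + 1) : Nat) : Int) else 0)

theorem sum_map_add (f g : List Int → Int) (l : List (List Int)) :
    (l.map (fun t => f t + g t)).sum = (l.map f).sum + (l.map g).sum := by
  induction l with
  | nil => simp
  | cons a l ih => simp [ih]; ring

theorem inner_fold (m p : Int) (teams : List (List Int)) :
    ∀ (acc : Int) (acc2 : List (List Int)),
    teams.foldl
        (fun (st : Int × List (List Int)) team =>
          let newTeam := [p] ++ team
          ((if m ≤ (newTeam.length : Int) then st.1 + 1 else st.1), st.2 ++ [newTeam]))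
        (acc, acc2)
      = (acc + (teams.map (fun t => if m ≤ (t.length : Int) + 1 then (1 : Int) else 0)).sum,
         acc2 ++ teams.map (fun t => [p] ++ t)) := by
  induction teams with
  | nil => simp
  | cons t ts ih =>
      intro acc acc2
      simp only [List.foldl_cons, List.map_cons, List.sum_cons, ih, Prod.mk.injEq]
      have hlen : ((([p] ++ t).length : Nat) : Int) = ((t.length : Nat) : Int) + 1 := by
        simp
      constructor
      · rw [hlen]; split_ifs <;> ring
      · simp

theorem loop_eq (m : Int) : ∀ (ps : List Int) (teams : List (List Int)) (acc : Int),
    countTeamsLoop m ps teams acc = acc + (teams.map (fun t => Wf m ps.length t.length)).sum := by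
  intro ps
  induction ps with
  | nil => intro teams acc; simp [countTeamsLoop, Wf]
  | cons p rest ih =>
      intro teams acc
      rw [countTeamsLoop, inner_fold, ih]
      simp only [List.nil_append, List.map_map, List.map_append, List.sum_append, List.length_cons]
      have h1 : List.map ((fun t => Wf m rest.length t.length) ∘ fun t => [p] ++ t) teams
          = teams.map (fun t => Wf m rest.length (t.length + 1)) := by
        apply List.map_congr_left; intro t _; simp
      rw [h1]
      have hW : teams.map (fun t => Wf m (rest.length + 1) t.length)
          = teams.map (fun t => (Wf m rest.length t.length + Wf m rest.length (t.length + 1))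
              + (if m ≤ (t.length : Int) + 1 then (1 : Int) else 0)) := by
        apply List.map_congr_left; intro t _; simp [Wf]
      rw [hW,
        sum_map_add (fun t => Wf m rest.length t.length + Wf m rest.length (t.length + 1))
          (fun t => if m ≤ ((t : List Int).length : Int) + 1 then (1 : Int) else 0),
        sum_map_add (fun t => Wf m rest.length t.length) (fun t => Wf m rest.length ((t : List Int).length + 1))]
      ring

theorem Wf_eq_Sf (m : Int) : ∀ (j l : Nat), Wf m j l = Sf m j l := by
  intro j
  induction j with
  | zero => intro l; simp [Wf, Sf]
  | succ j ih =>
      intro l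
      have hsplit : Sf m (j + 1) l
          = (∑ s ∈ Finset.range (j + 1),
              (if m ≤ (l : Int) + ((s : Int) + 1) then ((j.choose s : Nat) : Int) else 0))
          + (∑ s ∈ Finset.range (j + 1),
              (if m ≤ (l : Int) + ((s : Int) + 1) then ((j.choose (s + 1) : Nat) : Int) else 0)) := by
        rw [← Finset.sum_add_distrib]
        apply Finset.sum_congr rfl; intro s _
        rw [Nat.choose_succ_succ]
        push_cast
        split_ifs <;> ring
      have hsecond : (∑ s ∈ Finset.range (j + 1),
              (if m ≤ (l : Int) + ((s : Int) + 1) then ((j.choose (s + 1) : Nat) : Int) else 0))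
          = Sf m j l := by
        rw [Finset.sum_range_succ, Nat.choose_succ_self]
        simp [Sf]
      have hfirst : (∑ s ∈ Finset.range (j + 1),
              (if m ≤ (l : Int) + ((s : Int) + 1) then ((j.choose s : Nat) : Int) else 0))
          = (if m ≤ (l : Int) + 1 then 1 else 0) + Sf m j (l + 1) := by
        rw [Finset.sum_range_succ']
        have : (∑ s ∈ Finset.range j,
            (if m ≤ (l : Int) + (((s + 1 : Nat) : Int) + 1) then ((j.choose (s + 1) : Nat) : Int) else 0))
            = Sf m j (l + 1) := by
          apply Finset.sum_congr rfl; intro s _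
          have hc : (m ≤ (l : Int) + (((s + 1 : Nat) : Int) + 1)) ↔ (m ≤ ((l + 1 : Nat) : Int) + ((s : Int) + 1)) := by
            push_cast; omega
          exact if_congr hc rfl rfl
        rw [this]
        norm_num [add_comm]
      rw [Wf, ih, ih, hsplit, hsecond, hfirst]
      ring

-- B's loop invariant: after processing k = 1..K the accumulator is the partial binomial sum
-- and the carried value c is C(Q, K)
theorem alt_fold_spec (m : Int) (Q : Nat) : ∀ (K : Nat), K ≤ Q →
    ((PySem.List.pyRange 1 ((K : Int) + 1) 1).foldl
      (fun (st : Int × Int) k =>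
        let c := PySem.Int.floordiv (st.2 * ((Q : Int) - k + 1)) k
        ((if m ≤ k then st.1 + c else st.1), c))
      (0, 1))
    = (∑ s ∈ Finset.range K, (if m ≤ (s : Int) + 1 then ((Q.choose (s + 1) : Nat) : Int) else 0),
       ((Q.choose K : Nat) : Int)) := by
  intro K
  induction K with
  | zero =>
      intro _
      rw [PySem.List.pyRange_one_eq_nil (by norm_num)]
      simp
  | succ K ih =>
      intro hK
      have hK' : K ≤ Q := Nat.le_of_succ_le hK
      have hrange : PySem.List.pyRange 1 (((K + 1 : Nat) : Int) + 1) 1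
          = PySem.List.pyRange 1 ((K : Int) + 1) 1 ++ [(K : Int) + 1] := by
        have := PySem.List.pyRange_one_succ_right (a := 1) (b := (K : Int) + 1) (by omega)
        rw [← this]; norm_num
      rw [hrange, List.foldl_append, ih hK']
      simp only [List.foldl_cons, List.foldl_nil]
      have hc : PySem.Int.floordiv (((Q.choose K : Nat) : Int) * ((Q : Int) - ((K : Int) + 1) + 1)) ((K : Int) + 1)
          = ((Q.choose (K + 1) : Nat) : Int) := by
        have hsub : (Q : Int) - ((K : Int) + 1) + 1 = ((Q - K : Nat) : Int) := by
          push_cast [Nat.cast_sub hK']; ring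
        rw [hsub]
        have hmul : ((Q.choose K : Nat) : Int) * ((Q - K : Nat) : Int)
            = ((Q.choose (K + 1) * (K + 1) : Nat) : Int) := by
          exact_mod_cast congrArg (fun n : Nat => (n : Int)) (Nat.choose_succ_right_eq Q K).symm
        rw [hmul]
        have : ((K : Int) + 1) = (((K + 1 : Nat)) : Int) := by push_cast; ring
        rw [this, PySem.Int.floordiv_natCast]
        norm_num [Nat.mul_div_cancel]
      rw [hc, Finset.sum_range_succ]
      simp only [Prod.mk.injEq, and_true]
      split_ifs <;> simp

theorem filter_fold (minLevel maxLevel : Int) (skills : List Int) :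
    ∀ (init : List Int),
    skills.foldl (fun q a => if minLevel ≤ a ∧ a ≤ maxLevel then q ++ [a] else q) init
      = init ++ skills.filter (fun a => decide (minLevel ≤ a ∧ a ≤ maxLevel)) := by
  induction skills with
  | nil => simp
  | cons a l ih =>
      intro init
      by_cases h : minLevel ≤ a ∧ a ≤ maxLevel <;> simp [h, ih]

theorem count_fold (minLevel maxLevel : Int) (skills : List Int) :
    ∀ (init : Int),
    skills.foldl (fun q a => if minLevel ≤ a ∧ a ≤ maxLevel then q + 1 else q) init
      = init + ((skills.countP (fun a => decide (minLevel ≤ a ∧ a ≤ maxLevel)) : Nat) : Int) := by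
  induction skills with
  | nil => simp
  | cons a l ih =>
      intro init
      by_cases h : minLevel ≤ a ∧ a ≤ maxLevel <;>
        simp [List.countP_cons, h, ih] <;> push_cast <;> ring

-- ===== VERDICT (by name: the statement is the Claim_ definition above) =====
theorem countTeams_spec : Claim_equal_countTeams := by
  intro num skills m minLevel maxLevel _
  unfold Spec_countTeams countTeams countTeams_alt
  set P : Int → Bool := fun a => decide (minLevel ≤ a ∧ a ≤ maxLevel) with hP
  set Q : Nat := skills.countP P with hQ
  rw [filter_fold, count_fold, loop_eq]
  have hlen : ((List.nil ++ skills.filter P).reverse).length = Q := by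
    simp [hQ, ← List.countP_eq_length_filter]
  rw [hlen]
  simp only [List.map_cons, List.map_nil, List.sum_cons, List.sum_nil, List.length_nil, zero_add]
  rw [Wf_eq_Sf, ← hP, ← hQ, alt_fold_spec m Q Q (le_refl Q)]
  simp [Sf]
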